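-- pv_equiv track=rewrite | github.com/ManiDiAmarena/PyConverter | main.py | validate_numeric_input
-- ===== SOURCE A (Python) =====
-- def validate_numeric_input(P):
--     if P == "": return True
--     try:
--         if P.count('.') <= 1 and all(char.isdigit() or char == '.' for char in P):
--             if P == ".": return False
--             return True
--         else: return False
--     except ValueError: return False
-- ===== SOURCE B (Python) =====
-- def validate_numeric_input(P):
--     parts = P.split('.')
--     if len(parts) > 2:
--         return False
--     if all(part == '' or part.isdigit() for part in parts):
--         return P != '.'
--     return False
-- ===== Notes on version B (the rewrite author's own statement) =====
-- stated objective: alternative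
-- what changed: A scans the characters (a dot count plus an all-chars digit-or-dot pass); B instead splits the string on the dot separator and validates the resulting parts: more than two parts rejects, every part must be empty or all-digits, then a lone dot is rejected.
import Mathlib
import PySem

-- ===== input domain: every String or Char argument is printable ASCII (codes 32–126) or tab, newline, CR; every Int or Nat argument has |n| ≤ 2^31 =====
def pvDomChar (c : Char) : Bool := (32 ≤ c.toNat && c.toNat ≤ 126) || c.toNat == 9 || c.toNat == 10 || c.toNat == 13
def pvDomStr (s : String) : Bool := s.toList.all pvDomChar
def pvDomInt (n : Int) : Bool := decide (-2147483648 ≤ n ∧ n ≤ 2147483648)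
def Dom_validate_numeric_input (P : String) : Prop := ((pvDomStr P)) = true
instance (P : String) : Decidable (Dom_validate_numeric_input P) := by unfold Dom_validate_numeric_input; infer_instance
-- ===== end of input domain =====

-- B replaces A's character-level scan (count('.') and all(isdigit-or-dot)) by a
-- split-on-'.' decomposition that validates the resulting parts; objective: alternative, same cost.

-- ===== PORT A =====
def validate_numeric_input (P : String) : Bool :=
  if P == "" then true
  else if decide (PySem.Str.count P "." ≤ 1)
          && P.toList.all (fun c => PySem.Chars.isdigit c || c == '.') then
    if P == "." then false else true
  else false

-- ===== PORT B =====
def validate_numeric_input_alt (P : String) : Bool :=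
  let parts := PySem.Chars.splitOn P.toList ".".toList
  if parts.length > 2 then false
  else if parts.all (fun part => part == [] || PySem.Chars.strIsdigit part) then
    P != "."
  else false

-- ===== PRECONDITION & SPEC =====
def Spec_validate_numeric_input (P : String) (out : Bool) : Prop := out = validate_numeric_input_alt P
instance (P : String) (out : Bool) : Decidable (Spec_validate_numeric_input P out) := by unfold Spec_validate_numeric_input; infer_instance

-- ===== CLAIM (what is proved, stated in full; the proofs are below) =====
def Claim_equal_validate_numeric_input : Prop := ∀ (P : String), Dom_validate_numeric_input P → Spec_validate_numeric_input P (validate_numeric_input P)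

-- ===== LEMMAS AND PROOFS =====

-- reference splitter on a single-char separator '.'
def pvSpl : List Char → List (List Char)
  | [] => [[]]
  | c :: rest =>
    if c = '.' then [] :: pvSpl rest
    else
      match pvSpl rest with
      | [] => [[c]]      -- unreachable: pvSpl is never []
      | p :: ps => (c :: p) :: ps

theorem pvSpl_ne_nil (l : List Char) : pvSpl l ≠ [] := by
  cases l with
  | nil => simp [pvSpl]
  | cons c rest =>
    simp only [pvSpl]
    split_ifs
    · simp
    · cases h : pvSpl rest <;> simp

-- the fueled splitOn.go on separator ['.'] computed against pvSpl
theorem pvGo_eq (l : List Char) (fuel : Nat) (cur : List Char) (acc : List (List Char))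
    (hf : l.length ≤ fuel) :
    PySem.Chars.splitOn.go ['.'] fuel l cur acc
      = acc.reverse ++ (match pvSpl l with
                        | [] => [cur.reverse]
                        | p :: ps => (cur.reverse ++ p) :: ps) := by
  induction l generalizing fuel cur acc with
  | nil =>
    cases fuel <;> simp [PySem.Chars.splitOn.go, pvSpl]
  | cons c rest ih =>
    cases fuel with
    | zero => simp at hf
    | succ n =>
      rw [PySem.Chars.splitOn.go]
      by_cases hc : c = '.'
      · subst hc
        simp only [pvSpl]
        rw [if_pos (by simp [List.isPrefixOf])]
        rw [show List.drop (['.'] : List Char).length ('.' :: rest) = rest from rfl]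
        rw [ih _ [] _ (by simpa using hf)]
        cases h : pvSpl rest with
        | nil => exact absurd h (pvSpl_ne_nil rest)
        | cons p ps => simp
      · rw [if_neg (by simp [List.isPrefixOf, hc]; exact fun h => absurd h.symm hc)]
        rw [ih _ (c :: cur) _ (by simpa using hf)]
        simp only [pvSpl, if_neg hc]
        cases h : pvSpl rest with
        | nil => exact absurd h (pvSpl_ne_nil rest)
        | cons p ps => simp

theorem pvSplitOn_eq (l : List Char) : PySem.Chars.splitOn l ['.'] = pvSpl l := by
  rw [PySem.Chars.splitOn, pvGo_eq l (l.length + 1) [] [] (by omega)]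
  cases h : pvSpl l with
  | nil => exact absurd h (pvSpl_ne_nil l)
  | cons p ps => simp

theorem pvSpl_length (l : List Char) : (pvSpl l).length = l.count '.' + 1 := by
  induction l with
  | nil => simp [pvSpl]
  | cons c rest ih =>
    simp only [pvSpl]
    by_cases hc : c = '.'
    · subst hc
      rw [if_pos rfl]
      simp [List.count_cons, ih]
    · cases h : pvSpl rest with
      | nil => exact absurd h (pvSpl_ne_nil rest)
      | cons p ps =>
        simp only [if_neg hc, List.length_cons, List.count_cons]
        rw [show (pvSpl rest).length = (p :: ps).length from by rw [h]] at ih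
        simp [h, ← ih, hc]

-- Chars.count with the one-char needle '.' is List.count
theorem pvGoSingle (l : List Char) (fuel acc : Nat) (h : l.length ≤ fuel) :
    PySem.Chars.count.go ['.'] fuel l acc = acc + l.count '.' := by
  induction l generalizing fuel acc with
  | nil => cases fuel <;> simp [PySem.Chars.count.go]
  | cons c cs ih =>
    cases fuel with
    | zero => simp at h
    | succ n =>
      rw [PySem.Chars.count.go]
      by_cases hc : c = '.'
      · subst hc
        simp [List.isPrefixOf, ih _ _ (by simpa using h)]
        omega
      · simp [List.isPrefixOf, hc, ih _ _ (by simpa using h)]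
        exact Ne.symm hc

theorem pvCountDot (l : List Char) : PySem.Chars.count l ['.'] = l.count '.' := by
  simp [PySem.Chars.count, pvGoSingle l l.length 0 le_rfl]

-- "empty or isdigit" for a part is just "all chars are digits"
theorem pvPartOk (p : List Char) :
    ((p == []) || PySem.Chars.strIsdigit p) = p.all PySem.Chars.isdigit := by
  cases p with
  | nil => simp
  | cons c rest => simp [PySem.Chars.strIsdigit]

theorem pvSpl_all (l : List Char) :
    (pvSpl l).all (fun p => p.all PySem.Chars.isdigit)
      = l.all (fun c => PySem.Chars.isdigit c || c == '.') := by
  induction l with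
  | nil => simp [pvSpl]
  | cons c rest ih =>
    simp only [pvSpl]
    by_cases hc : c = '.'
    · subst hc; simp [ih]
    · cases h : pvSpl rest with
      | nil => exact absurd h (pvSpl_ne_nil rest)
      | cons p ps =>
        simp only [if_neg hc, List.all_cons, ← ih, h]
        cases hd : PySem.Chars.isdigit c <;> simp [hd, hc]

-- ===== VERDICT (by name: the statement is the Claim_ definition above) =====
theorem validate_numeric_input_spec : Claim_equal_validate_numeric_input := by
  intro P _
  unfold Spec_validate_numeric_input validate_numeric_input validate_numeric_input_alt
  have hdl : (".".toList) = ['.'] := rfl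
  simp only [hdl, pvSplitOn_eq, pvSpl_length]
  have hall : (pvSpl P.toList).all (fun part => (part == []) || PySem.Chars.strIsdigit part)
      = P.toList.all (fun c => PySem.Chars.isdigit c || c == '.') := by
    rw [← pvSpl_all, show (fun part => (part == []) || PySem.Chars.strIsdigit part)
      = (fun p : List Char => p.all PySem.Chars.isdigit) from funext pvPartOk]
  rw [hall, PySem.Str.count_eq, hdl]
  by_cases h0 : P = ""
  · subst h0; decide
  · by_cases hdot : P = "."
    · subst hdot; decide
    · have hb : (P != ".") = true := by simp [hdot]
      have hcnt : PySem.Chars.count P.toList ['.'] = P.toList.count '.' := by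
        exact pvCountDot _
      simp only [h0, hb, beq_iff_eq, if_neg h0, hcnt]
      by_cases hle : P.toList.count '.' ≤ 1
      · have : ¬ P.toList.count '.' + 1 > 2 := by omega
        simp [hle, this]
        exact fun _ => hdot
      · have : P.toList.count '.' + 1 > 2 := by omega
        simp [hle, this]
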